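-- pv_equiv track=rewrite | github.com/pfnet-research/jfbench | src/jfbench/constraints/ifbench_format/quotes.py | _max_alternating_quote_depth
-- ===== SOURCE A (Python) =====
-- def _max_alternating_quote_depth(value: str) -> tuple[int, bool]:
--     """
--     Compute a simple heuristic of nested alternating quote depth.
--
--     We treat a quote character as:
--     - opening a new level when it is different from the current top of the stack
--     - closing the current level when it is the same as the top of the stack
--
--     This is a heuristic for natural language style nested quotes like:
--         "outer 'middle \"inner\"' text"
--     """
--     stack: list[str] = []
--     max_depth = 0
--
--     for ch in value:
--         if ch not in ('"', "'"):
--             continue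
--
--         if stack and stack[-1] == ch:
--             # Same quote as top of stack -> treat as closing
--             stack.pop()
--         else:
--             # Different quote or stack empty -> treat as opening
--             stack.append(ch)
--             max_depth = max(max_depth, len(stack))
--
--     # Return both the maximum depth and whether all quotes were balanced
--     return max_depth, len(stack) == 0
-- ===== SOURCE B (Python) =====
-- def _max_alternating_quote_depth(value: str) -> tuple[int, bool]:
--     # Algebraic method: push-if-different / pop-if-equal is exactly word
--     # reduction in the infinite dihedral group C2 * C2.  Map '"' to the
--     # reflection x -> -x and "'" to the reflection x -> -x + 2 and keep only
--     # the affine image (s, t) : x -> s*x + t of the prefix of quote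
--     # characters.  The reduced word (= A's stack) has length |t| when s = 1
--     # and |t - 1| when s = -1, so depth and balance are closed formulas in
--     # (s, t) and no stack is needed.
--     s, t = 1, 0
--     max_depth = 0
--     for ch in value:
--         if ch == '"':
--             s = -s
--         elif ch == "'":
--             t += 2 * s
--             s = -s
--         else:
--             continue
--         d = abs(t) if s == 1 else abs(t - 1)
--         if d > max_depth:
--             max_depth = d
--     return max_depth, s == 1 and t == 0
-- ===== Notes on version B (the rewrite author's own statement) =====
-- stated objective: alternative
-- what changed: Replaces the stack simulation by evaluating the quote word in the infinite dihedral group C2*C2 via an affine representation (sign s, translation t) -- each quote acts as a reflection on Z -- and reads the depth and balance off closed formulas in (s, t); no stack or top-of-stack comparison exists in B.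
import Mathlib
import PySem

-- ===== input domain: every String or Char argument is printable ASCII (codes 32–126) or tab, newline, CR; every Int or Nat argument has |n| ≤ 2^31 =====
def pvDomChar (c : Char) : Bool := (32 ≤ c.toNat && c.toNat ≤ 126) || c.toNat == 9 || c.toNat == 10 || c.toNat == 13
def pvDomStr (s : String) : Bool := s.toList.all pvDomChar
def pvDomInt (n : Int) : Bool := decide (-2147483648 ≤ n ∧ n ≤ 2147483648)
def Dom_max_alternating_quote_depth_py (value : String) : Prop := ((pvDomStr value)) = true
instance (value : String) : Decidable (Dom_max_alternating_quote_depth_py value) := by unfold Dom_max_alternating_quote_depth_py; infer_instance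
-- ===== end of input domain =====

-- B replaces A's stack simulation by evaluating the quote word in the infinite dihedral
-- group C2 * C2 through an affine representation (sign, translation); no stack is kept.

-- ===== PORT A =====
-- stack kept head-first: head = Python's stack[-1]; 'stack and stack[-1]==ch' is head? = some ch
def pvStepA (s : List Char × Int) (ch : Char) : List Char × Int :=
  if ch ≠ '"' ∧ ch ≠ '\'' then s
  else if s.1.head? = some ch then (s.1.tail, s.2)
  else (ch :: s.1, max s.2 ((s.1.length : Int) + 1))

def max_alternating_quote_depth_py (value : String) : Int × Bool :=
  let r := value.toList.foldl pvStepA ([], 0)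
  (r.2, r.1.length == 0)

-- ===== PORT B =====
-- state (s, t, max_depth); '"' acts as x ↦ -x, '\'' as x ↦ -x + 2
def pvStepB (st : Int × Int × Int) (ch : Char) : Int × Int × Int :=
  if ch = '"' then
    let s := -st.1
    let t := st.2.1
    (s, t, max st.2.2 (if s = 1 then |t| else |t - 1|))
  else if ch = '\'' then
    let t := st.2.1 + 2 * st.1
    let s := -st.1
    (s, t, max st.2.2 (if s = 1 then |t| else |t - 1|))
  else st

def max_alternating_quote_depth_py_alt (value : String) : Int × Bool :=
  let r := value.toList.foldl pvStepB (1, 0, 0)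
  (r.2.2, r.1 == 1 && r.2.1 == 0)

-- ===== PRECONDITION & SPEC =====
def Spec_max_alternating_quote_depth_py (value : String) (out : Int × Bool) : Prop := out = max_alternating_quote_depth_py_alt value
instance (value : String) (out : Int × Bool) : Decidable (Spec_max_alternating_quote_depth_py value out) := by unfold Spec_max_alternating_quote_depth_py; infer_instance

-- ===== CLAIM (what is proved, stated in full; the proofs are below) =====
def Claim_equal_max_alternating_quote_depth_py : Prop := ∀ (value : String), Dom_max_alternating_quote_depth_py value → Spec_max_alternating_quote_depth_py value (max_alternating_quote_depth_py value)

-- ===== LEMMAS AND PROOFS =====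

-- group element (s, t) of the stack word read bottom-to-top (list is head = top)
def pvPsi : List Char → Int × Int
  | [] => (1, 0)
  | c :: r =>
    let p := pvPsi r
    (-p.1, p.2 + if c = '\'' then 2 * p.1 else 0)

theorem pvPsi_cons (c : Char) (r : List Char) :
    pvPsi (c :: r) = (-(pvPsi r).1, (pvPsi r).2 + if c = '\'' then 2 * (pvPsi r).1 else 0) := rfl

def pvDF (p : Int × Int) : Int := if p.1 = 1 then |p.2| else |p.2 - 1|

-- characterisation of pvPsi on alternating quote stacks
theorem pvPsi_char (stack : List Char)
    (hq : ∀ c ∈ stack, c = '"' ∨ c = '\'')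
    (hch : stack.IsChain (· ≠ ·)) :
    pvPsi stack =
      ((if stack.length % 2 = 0 then 1 else -1),
       (match stack.head? with
        | none => 0
        | some c =>
          if c = '"' then (if stack.length % 2 = 0 then (stack.length : Int) else -((stack.length : Int) - 1))
          else (if stack.length % 2 = 0 then -(stack.length : Int) else (stack.length : Int) + 1))) := by
  induction stack with
  | nil => simp [pvPsi]
  | cons c rest ih =>
    have hqr : ∀ x ∈ rest, x = '"' ∨ x = '\'' := fun x hx => hq x (List.mem_cons_of_mem _ hx)
    have hchr : rest.IsChain (· ≠ ·) := hch.tail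
    have hrec := ih hqr hchr
    have hqc : c = '"' ∨ c = '\'' := hq c (by simp)
    cases rest with
    | nil =>
      rcases hqc with h | h <;> subst h <;> simp [pvPsi]
    | cons c' rest' =>
      have hne : c ≠ c' := by
        have := List.isChain_cons.mp hch
        exact this.1 c' (by simp)
      have hqc' : c' = '"' ∨ c' = '\'' := hqr c' (by simp)
      rcases Nat.mod_two_eq_zero_or_one rest'.length with h2' | h2'
      · have h2 : (rest'.length + 1) % 2 = 1 := by omega
        have h3 : (rest'.length + 2) % 2 = 0 := by omega
        rcases hqc with h | h <;> rcases hqc' with h' | h' <;>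
          (try (exact absurd (h.trans h'.symm) hne)) <;> subst h <;> subst h' <;>
          · simp only [pvPsi_cons, hrec, List.head?_cons, List.length_cons, h2, h3]
            norm_num
            push_cast
            try constructor
            all_goals ring
      · have h2 : (rest'.length + 1) % 2 = 0 := by omega
        have h3 : (rest'.length + 2) % 2 = 1 := by omega
        rcases hqc with h | h <;> rcases hqc' with h' | h' <;>
          (try (exact absurd (h.trans h'.symm) hne)) <;> subst h <;> subst h' <;>
          · simp only [pvPsi_cons, hrec, List.head?_cons, List.length_cons, h2, h3]
            norm_num
            push_cast
            try constructor
            all_goals ring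

theorem pvDF_psi (stack : List Char)
    (hq : ∀ c ∈ stack, c = '"' ∨ c = '\'')
    (hch : stack.IsChain (· ≠ ·)) :
    pvDF (pvPsi stack) = (stack.length : Int) := by
  rw [pvPsi_char stack hq hch]
  cases stack with
  | nil => simp [pvDF]
  | cons c rest =>
    have hq1 : c = '"' ∨ c = '\'' := hq c (by simp)
    rcases hq1 with h | h <;> subst h <;>
      · simp only [pvDF, List.head?_cons, List.length_cons]
        split_ifs
        all_goals simp only [Int.abs_eq_natAbs]
        all_goals first | omega | simp_all

-- psi of empty iff (1,0) on alternating quote stacks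
theorem pvPsi_eq_one_zero (stack : List Char)
    (hq : ∀ c ∈ stack, c = '"' ∨ c = '\'')
    (hch : stack.IsChain (· ≠ ·)) :
    (pvPsi stack = (1, 0)) ↔ stack = [] := by
  constructor
  · intro h
    have hd := pvDF_psi stack hq hch
    rw [h] at hd
    simp [pvDF] at hd
    exact List.length_eq_zero_iff.mp (by omega)
  · intro h; subst h; simp [pvPsi]

-- coupling invariant between A's state and B's state
def pvInv (a : List Char × Int) (b : Int × Int × Int) : Prop :=
  (∀ c ∈ a.1, c = '"' ∨ c = '\'') ∧ a.1.IsChain (· ≠ ·) ∧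
  (b.1, b.2.1) = pvPsi a.1 ∧ b.2.2 = a.2 ∧ ((a.1.length : Int)) ≤ a.2

theorem pvInv_step (a : List Char × Int) (b : Int × Int × Int) (ch : Char)
    (h : pvInv a b) : pvInv (pvStepA a ch) (pvStepB b ch) := by
  obtain ⟨stack, m⟩ := a
  obtain ⟨s, t, mx⟩ := b
  obtain ⟨hq, hch, hpsi, hm, hlen⟩ := h
  simp only at hq hch hpsi hm hlen
  by_cases hquote : ch = '"' ∨ ch = '\''
  · have hguard : ¬ (ch ≠ '"' ∧ ch ≠ '\'') := by tauto
    -- B's step is multiplication by the involution M ch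
    have hBstep : pvStepB (s, t, mx) ch =
        (-s, t + (if ch = '\'' then 2 * s else 0),
         max mx (pvDF (-s, t + (if ch = '\'' then 2 * s else 0)))) := by
      rcases hquote with h1 | h1 <;> subst h1 <;> simp [pvStepB, pvDF]
    by_cases hpop : stack.head? = some ch
    · -- pop branch: new stack is the tail; B's product collapses by M ch * M ch = 1
      obtain ⟨c0, rest, rfl⟩ : ∃ c0 rest, stack = c0 :: rest := by
        cases stack with
        | nil => simp at hpop
        | cons x xs => exact ⟨x, xs, rfl⟩
      have hc0 : c0 = ch := by simpa using hpop
      subst hc0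
      have hpsi_tail : (-s, t + (if c0 = '\'' then 2 * s else 0)) = pvPsi rest := by
        have : pvPsi (c0 :: rest) = (-(pvPsi rest).1, (pvPsi rest).2 + if c0 = '\'' then 2 * (pvPsi rest).1 else 0) := by
          simp [pvPsi]
        rw [this] at hpsi
        have hs : s = -(pvPsi rest).1 := congrArg Prod.fst hpsi
        have ht : t = (pvPsi rest).2 + (if c0 = '\'' then 2 * (pvPsi rest).1 else 0) := congrArg Prod.snd hpsi
        subst hs ht
        split_ifs <;> simp
      have hqr : ∀ c ∈ rest, c = '"' ∨ c = '\'' := fun c hc => hq c (List.mem_cons_of_mem _ hc)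
      have hchr : rest.IsChain (· ≠ ·) := hch.tail
      have hdf : pvDF (-s, t + (if c0 = '\'' then 2 * s else 0)) = (rest.length : Int) := by
        rw [hpsi_tail]; exact pvDF_psi rest hqr hchr
      have hrm : ((rest.length : Int)) ≤ m := by
        simp only [List.length_cons] at hlen
        push_cast at hlen ⊢
        omega
      simp only [pvStepA, if_neg hguard, if_pos hpop, hBstep]
      refine ⟨hqr, hchr, by simpa using hpsi_tail, ?_, ?_⟩
      · rw [hdf, hm]
        exact max_eq_left hrm
      · simpa using hrm
    · -- push branch
      have hpsi_new : (-s, t + (if ch = '\'' then 2 * s else 0)) = pvPsi (ch :: stack) := by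
        have : pvPsi (ch :: stack) = (-(pvPsi stack).1, (pvPsi stack).2 + if ch = '\'' then 2 * (pvPsi stack).1 else 0) := by
          simp [pvPsi]
        rw [this, ← hpsi]
      have hqn : ∀ c ∈ ch :: stack, c = '"' ∨ c = '\'' := by
        intro c hc
        rcases List.mem_cons.mp hc with h | h
        · subst h; exact hquote
        · exact hq c h
      have hchn : (ch :: stack).IsChain (· ≠ ·) := by
        refine List.isChain_cons.mpr ⟨?_, hch⟩
        intro y hy heq
        exact hpop (by rw [hy, heq])
      have hdf : pvDF (-s, t + (if ch = '\'' then 2 * s else 0)) = ((ch :: stack).length : Int) := by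
        rw [hpsi_new]; exact pvDF_psi _ hqn hchn
      simp only [pvStepA, if_neg hguard, if_neg hpop, hBstep, hdf]
      refine ⟨hqn, hchn, by simpa using hpsi_new, ?_, ?_⟩
      · simp only [hm, List.length_cons]; push_cast; omega
      · simp only [List.length_cons]
        push_cast
        omega
  · have hguard : ch ≠ '"' ∧ ch ≠ '\'' := by tauto
    have hB : pvStepB (s, t, mx) ch = (s, t, mx) := by
      simp [pvStepB, hguard.1, hguard.2]
    simp only [pvStepA, if_pos hguard, hB]
    exact ⟨hq, hch, hpsi, hm, hlen⟩

theorem pvInv_foldl (l : List Char) (a : List Char × Int) (b : Int × Int × Int)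
    (h : pvInv a b) : pvInv (l.foldl pvStepA a) (l.foldl pvStepB b) := by
  induction l generalizing a b with
  | nil => exact h
  | cons ch l ih => exact ih _ _ (pvInv_step a b ch h)

-- ===== VERDICT (by name: the statement is the Claim_ definition above) =====
theorem max_alternating_quote_depth_py_spec : Claim_equal_max_alternating_quote_depth_py := by
  intro value _
  unfold Spec_max_alternating_quote_depth_py
  unfold max_alternating_quote_depth_py max_alternating_quote_depth_py_alt
  have h := pvInv_foldl value.toList ([], 0) (1, 0, 0)
    ⟨by simp, by simp, by simp [pvPsi], rfl, by simp⟩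
  obtain ⟨hq, hch, hpsi, hm, -⟩ := h
  set ra := value.toList.foldl pvStepA ([], 0) with hra
  set rb := value.toList.foldl pvStepB (1, 0, 0) with hrb
  simp only
  refine Prod.ext (by simpa using hm.symm) ?_
  simp only
  have hiff := pvPsi_eq_one_zero ra.1 hq hch
  rw [← hpsi] at hiff
  by_cases hempty : ra.1 = []
  · have : (rb.1, rb.2.1) = (1, 0) := by rw [hiff]; exact hempty
    have h1 : rb.1 = 1 := congrArg Prod.fst this
    have h2 : rb.2.1 = 0 := congrArg Prod.snd this
    simp [hempty, h1, h2]
  · have hne : ¬ ((rb.1, rb.2.1) = (1, 0)) := fun hc => hempty (hiff.mp hc)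
    have hlen : ra.1.length ≠ 0 := fun hc => hempty (List.length_eq_zero_iff.mp hc)
    have : ¬ (rb.1 = 1 ∧ rb.2.1 = 0) := by
      rintro ⟨h1, h2⟩; exact hne (by rw [h1, h2])
    have hA : (ra.1.length == 0) = false := by simpa using hlen
    have hB : (rb.1 == 1 && rb.2.1 == 0) = false := by
      rcases Decidable.not_and_iff_not_or_not.mp this with h | h <;> simp [h]
    rw [hA, hB]
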